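-- pv_equiv track=rewrite | github.com/rows15Bots/PixelsOficialHostPc | vmmanager/vmmanager.py | getOldestOffFile
-- ===== SOURCE A (Python) =====
-- def getOldestOffFile(listOfOffs):
--     oldestPath = listOfOffs[0][0]
--     oldestTime = listOfOffs[0][1]
--     for path,date in listOfOffs:
--         if date < oldestTime:
--             oldestTime = date
--             oldestPath = path
--     return oldestPath,oldestTime
-- ===== SOURCE B (Python) =====
-- def getOldestOffFile(listOfOffs):
--     ordered = sorted(listOfOffs, key=lambda x: x[1])
--     path, date = ordered[0]
--     return path, date
-- ===== Notes on version B (the rewrite author's own statement) =====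
-- stated objective: simpler
-- what changed: Replaces the manual first-min scan (explicit running path/time accumulators) with a stable sort by the date component followed by taking the first element; stability makes the first element exactly the first-occurring strict-< minimum.
import Mathlib
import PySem

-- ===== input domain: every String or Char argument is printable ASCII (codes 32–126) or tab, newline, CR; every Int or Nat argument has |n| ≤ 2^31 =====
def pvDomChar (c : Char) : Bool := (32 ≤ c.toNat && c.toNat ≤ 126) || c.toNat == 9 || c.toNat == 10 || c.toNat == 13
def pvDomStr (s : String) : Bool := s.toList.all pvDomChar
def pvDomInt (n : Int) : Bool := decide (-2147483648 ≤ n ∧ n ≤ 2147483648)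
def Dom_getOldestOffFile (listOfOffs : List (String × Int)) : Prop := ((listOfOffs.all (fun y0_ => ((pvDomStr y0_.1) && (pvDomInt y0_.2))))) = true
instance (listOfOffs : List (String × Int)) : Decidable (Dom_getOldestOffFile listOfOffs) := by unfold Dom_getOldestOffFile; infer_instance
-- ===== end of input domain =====

-- B replaces A's manual first-minimum scan with a stable sort by date + take the first element (objective: simpler).
-- ===== PORT A =====
def getOldestOffFile (listOfOffs : List (String × Int)) : String × Int :=
  match PySem.List.pyGet? listOfOffs 0 with
  | none => ("", 0)  -- unreachable: Pre_ excludes the empty list (IndexError in Python)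
  | some first =>
    let oldestPath := first.1
    let oldestTime := first.2
    let st := listOfOffs.foldl
      (fun (acc : String × Int) pd =>
        if pd.2 < acc.2 then (pd.1, pd.2) else acc)
      (oldestPath, oldestTime)
    (st.1, st.2)

-- ===== PORT B =====
def getOldestOffFile_alt (listOfOffs : List (String × Int)) : String × Int :=
  let ordered := PySem.List.sorted listOfOffs (fun x => x.2) false
  match PySem.List.pyGet? ordered 0 with
  | none => ("", 0)  -- unreachable under Pre_
  | some pd => (pd.1, pd.2)

-- ===== PRECONDITION & SPEC =====
-- Pre_ excludes the empty list, on which A raises IndexError (listOfOffs[0]).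
def Pre_getOldestOffFile (listOfOffs : List (String × Int)) : Prop := listOfOffs ≠ []
instance (listOfOffs : List (String × Int)) : Decidable (Pre_getOldestOffFile listOfOffs) := by unfold Pre_getOldestOffFile; infer_instance
def pvWitness_getOldestOffFile : (List (String × Int)) := [("a", 1), ("b", 0)]
def Spec_getOldestOffFile (listOfOffs : List (String × Int)) (out : String × Int) : Prop := out = getOldestOffFile_alt listOfOffs
instance (listOfOffs : List (String × Int)) (out : String × Int) : Decidable (Spec_getOldestOffFile listOfOffs out) := by unfold Spec_getOldestOffFile; infer_instance

-- ===== CLAIM (what is proved, stated in full; the proofs are below) =====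
def Claim_equal_getOldestOffFile : Prop := ∀ (listOfOffs : List (String × Int)), Dom_getOldestOffFile listOfOffs → Pre_getOldestOffFile listOfOffs → Spec_getOldestOffFile listOfOffs (getOldestOffFile listOfOffs)

-- ===== LEMMAS AND PROOFS =====

-- The head of the insertion-sort accumulator evolves exactly like A's running minimum.
lemma head_foldl_insertBy (t : List (String × Int)) :
    ∀ (m : String × Int) (accRest : List (String × Int)),
    (t.foldl (fun acc x => PySem.List.insertBy (fun a b => decide (a.2 < b.2)) x acc) (m :: accRest)).head?
      = some (t.foldl (fun (acc : String × Int) pd => if pd.2 < acc.2 then (pd.1, pd.2) else acc) m) := by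
  induction t with
  | nil => intro m accRest; simp
  | cons x t ih =>
    intro m accRest
    simp only [List.foldl, PySem.List.insertBy]
    by_cases h : x.2 < m.2
    · simp only [h, decide_true, if_true]
      exact ih x (m :: accRest)
    · simp only [h, decide_false, if_false]
      exact ih m _

-- ===== VERDICT (by name: the statement is the Claim_ definition above) =====
theorem getOldestOffFile_spec : Claim_equal_getOldestOffFile := by
  intro l _ hpre
  unfold Spec_getOldestOffFile
  match l with
  | [] => exact absurd rfl hpre
  | h :: t =>
    have hsorted : (PySem.List.sorted (h :: t) (fun x : String × Int => x.2) false).head?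
        = some (t.foldl (fun (acc : String × Int) pd => if pd.2 < acc.2 then (pd.1, pd.2) else acc) h) := by
      rw [PySem.List.sorted_eq_foldl_insertBy]
      simp only [List.foldl, PySem.List.insertBy]
      exact head_foldl_insertBy t h []
    obtain ⟨rest, hrest⟩ : ∃ rest, PySem.List.sorted (h :: t) (fun x : String × Int => x.2) false
        = (t.foldl (fun (acc : String × Int) pd => if pd.2 < acc.2 then (pd.1, pd.2) else acc) h) :: rest := by
      rcases hs : PySem.List.sorted (h :: t) (fun x : String × Int => x.2) false with _ | ⟨y, rest⟩
      · rw [hs] at hsorted; simp at hsorted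
      · rw [hs] at hsorted; simp at hsorted; exact ⟨rest, by rw [hsorted]⟩
    simp only [getOldestOffFile, getOldestOffFile_alt, hrest]
    simp [PySem.List.pyGet?, PySem.List.pyIdx?, List.foldl]
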